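-- pv_equiv track=rewrite | github.com/PySCeS/PyscesToolbox | documentation/notebooks/fix_conversion.py | find_tables
-- ===== SOURCE A (Python) =====
-- def find_tables(lines):
--     """
--     For a list of lines, splits lines into blocks (stored in lists
--     of lines within two lists) representing tables or non tables. Also
--     return if a file starts with a table or a non-table (mostly
--     non-tables, but functionality is included for robustness).
--     """
--     in_table = False
--     tables = []
--     non_tables = []
--     current_table = []
--     current_non_table = []
--     text_first = None
--     for i, line in enumerate(lines):
--         if line.startswith('+') and line.strip().endswith('+') and not in_table:
--             in_table = True
--             if len(current_non_table) != 0: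
--                 non_tables.append(current_non_table)
--                 current_non_table = []
--             current_table.append(line)
--             if text_first is None:
--                 text_first = False
--         elif in_table and (line.startswith('+') or line.startswith('|')):
--             current_table.append(line)
--         elif in_table:
--             in_table = False
--             tables.append(current_table)
--             current_table = []
--             current_non_table.append(line)
--         else:
--             if text_first is None:
--                 text_first = True
--             current_non_table.append(line)
--     if len(current_non_table) != 0:
--         non_tables.append(current_non_table)
--     if len(current_table) != 0:
--         tables.append(current_table)
--     return tables, non_tables, text_first
-- ===== SOURCE B (Python) =====
-- def _is_open(line):
--     return line.startswith('+') and line.strip().endswith('+')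
--
--
-- def _is_cont(line):
--     return line.startswith('+') or line.startswith('|')
--
--
-- def find_tables(lines):
--     """Two-pointer run parser: greedily consume whole table / non-table
--     runs by index scans instead of a per-line state machine."""
--     tables = []
--     non_tables = []
--     text_first = None if not lines else not _is_open(lines[0])
--     i, n = 0, len(lines)
--     while i < n:
--         if _is_open(lines[i]):
--             j = i + 1
--             while j < n and _is_cont(lines[j]):
--                 j += 1
--             tables.append(lines[i:j])
--         else:
--             j = i + 1
--             while j < n and not _is_open(lines[j]):
--                 j += 1
--             non_tables.append(lines[i:j])
--         i = j
--     return tables, non_tables, text_first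
-- ===== Notes on version B (the rewrite author's own statement) =====
-- stated objective: alternative
-- what changed: Replaces A's per-line state machine with six mutable state variables (in_table flag, two current-block accumulators, end-of-loop flushes) by a two-pointer run parser that decides text_first up front from the first line and then greedily consumes each maximal table/non-table run with inner index scans, slicing whole blocks out at once.
import Mathlib
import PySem

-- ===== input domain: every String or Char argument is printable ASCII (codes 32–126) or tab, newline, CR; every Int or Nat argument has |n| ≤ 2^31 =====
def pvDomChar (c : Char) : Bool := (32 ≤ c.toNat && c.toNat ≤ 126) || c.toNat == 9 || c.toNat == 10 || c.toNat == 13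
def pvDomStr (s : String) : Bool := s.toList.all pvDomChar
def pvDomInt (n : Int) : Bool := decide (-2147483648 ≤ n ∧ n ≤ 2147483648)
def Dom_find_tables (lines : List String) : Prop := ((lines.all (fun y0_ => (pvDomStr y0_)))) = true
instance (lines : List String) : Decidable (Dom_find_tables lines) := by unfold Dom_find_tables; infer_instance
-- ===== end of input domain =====

-- B replaces A's per-line in_table state machine by a two-pointer run parser that consumes
-- whole table / non-table runs greedily (objective: alternative decomposition, same cost).

-- ===== PORT A =====
-- one step of A's for-loop over state (in_table, tables, non_tables, current_table, current_non_table, text_first)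
def stepA (st : Bool × List (List String) × List (List String) × List String × List String × Option Bool)
    (line : String) : Bool × List (List String) × List (List String) × List String × List String × Option Bool :=
  match st with
  | (in_table, tables, non_tables, ct, cnt, tf) =>
    if PySem.Str.startswith line "+" && PySem.Str.endswith (PySem.Str.strip line) "+" && !in_table then
      (true, tables, (if cnt ≠ [] then non_tables ++ [cnt] else non_tables), ct ++ [line],
        (if cnt ≠ [] then ([] : List String) else cnt), (if tf = none then some false else tf))
    else if in_table && (PySem.Str.startswith line "+" || PySem.Str.startswith line "|") then
      (in_table, tables, non_tables, ct ++ [line], cnt, tf)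
    else if in_table then
      (false, tables ++ [ct], non_tables, [], cnt ++ [line], tf)
    else
      (in_table, tables, non_tables, ct, cnt ++ [line], (if tf = none then some true else tf))

-- the two flushes after the loop and the return tuple
def finA (st : Bool × List (List String) × List (List String) × List String × List String × Option Bool) :
    List (List String) × List (List String) × Option Bool :=
  match st with
  | (_, tables, non_tables, ct, cnt, tf) =>
    ((if ct ≠ [] then tables ++ [ct] else tables), (if cnt ≠ [] then non_tables ++ [cnt] else non_tables), tf)

def find_tables (lines : List String) : List (List String) × List (List String) × Option Bool :=
  finA (lines.foldl stepA (false, [], [], [], [], none))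

-- ===== PORT B =====
def isOpen (line : String) : Bool :=
  PySem.Str.startswith line "+" && PySem.Str.endswith (PySem.Str.strip line) "+"

def isCont (line : String) : Bool :=
  PySem.Str.startswith line "+" || PySem.Str.startswith line "|"

-- B's while loop: each iteration consumes one whole run (the inner index scans are the takeWhile/dropWhile)
def altGo : List String → List (List String) × List (List String)
  | [] => ([], [])
  | l :: ls =>
    if isOpen l then
      ((l :: ls.takeWhile isCont) :: (altGo (ls.dropWhile isCont)).1,
       (altGo (ls.dropWhile isCont)).2)
    else
      ((altGo (ls.dropWhile (fun x => !isOpen x))).1,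
       (l :: ls.takeWhile (fun x => !isOpen x)) :: (altGo (ls.dropWhile (fun x => !isOpen x))).2)
termination_by l => l.length
decreasing_by all_goals exact Nat.lt_succ_of_le (List.length_dropWhile_le _ _)

def find_tables_alt (lines : List String) : List (List String) × List (List String) × Option Bool :=
  ((altGo lines).1, (altGo lines).2,
    match lines with
    | [] => none
    | l :: _ => some (!isOpen l))

-- ===== PRECONDITION & SPEC =====
def Spec_find_tables (lines : List String) (out : List (List String) × List (List String) × Option Bool) : Prop := out = find_tables_alt lines
instance (lines : List String) (out : List (List String) × List (List String) × Option Bool) : Decidable (Spec_find_tables lines out) := by unfold Spec_find_tables; infer_instance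

-- ===== CLAIM (what is proved, stated in full; the proofs are below) =====
def Claim_equal_find_tables : Prop := ∀ (lines : List String), Dom_find_tables lines → Spec_find_tables lines (find_tables lines)

-- ===== LEMMAS AND PROOFS =====

-- the non-table blocks produced from NT-state with pending partial block c
def ntb (c : List String) (lines : List String) : List (List String) :=
  (if c ++ lines.takeWhile (fun x => !isOpen x) = [] then [] else [c ++ lines.takeWhile (fun x => !isOpen x)]) ++
    (altGo (lines.dropWhile (fun x => !isOpen x))).2

def tfUpd (tf : Option Bool) (lines : List String) : Option Bool :=
  match lines with
  | [] => tf
  | l :: _ => match tf with | none => some (!isOpen l) | some b => some b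

theorem altGo_nil : altGo [] = ([], []) := by rw [altGo.eq_def]

theorem altGo_cons_open {l : String} (ls : List String) (h : isOpen l = true) :
    altGo (l :: ls) = ((l :: ls.takeWhile isCont) :: (altGo (ls.dropWhile isCont)).1,
      (altGo (ls.dropWhile isCont)).2) := by
  rw [altGo.eq_def]; simp [h]

theorem altGo_cons_not {l : String} (ls : List String) (h : isOpen l = false) :
    altGo (l :: ls) = ((altGo (ls.dropWhile (fun x => !isOpen x))).1,
      (l :: ls.takeWhile (fun x => !isOpen x)) :: (altGo (ls.dropWhile (fun x => !isOpen x))).2) := by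
  rw [altGo.eq_def]; simp [h]

theorem altGo_fst_dropWhile (ls : List String) :
    (altGo (ls.dropWhile (fun x => !isOpen x))).1 = (altGo ls).1 := by
  cases ls with
  | nil => rfl
  | cons l ls =>
    by_cases h : isOpen l = true
    · simp [h]
    · simp only [Bool.not_eq_true] at h
      rw [List.dropWhile_cons]
      simp only [h, Bool.not_false, if_pos trivial, altGo_cons_not ls h]

theorem tfUpd_some (x : Bool) (ls : List String) : tfUpd (some x) ls = some x := by
  cases ls <;> rfl

theorem mainAux (lines : List String) :
    (∀ ts ns c tf,
      finA (List.foldl stepA (false, ts, ns, [], c, tf) lines) =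
        (ts ++ (altGo lines).1, ns ++ ntb c lines, tfUpd tf lines)) ∧
    (∀ ts ns ct (b : Bool),
      ct ≠ [] →
      finA (List.foldl stepA (true, ts, ns, ct, [], some b) lines) =
        (ts ++ [ct ++ lines.takeWhile isCont] ++ (altGo (lines.dropWhile isCont)).1,
         ns ++ (altGo (lines.dropWhile isCont)).2, some b)) := by
  induction lines with
  | nil =>
    constructor
    · intro ts ns c tf
      by_cases h : c = [] <;>
        simp [finA, ntb, tfUpd, altGo_nil, h]
    · intro ts ns ct b hct
      simp [finA, altGo_nil, hct]
  | cons l ls ih =>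
    constructor
    · intro ts ns c tf
      rw [List.foldl_cons]
      by_cases h : isOpen l = true
      · obtain ⟨h1, h2⟩ : PySem.Chars.startswith l.toList ['+'] = true ∧
            PySem.Chars.endswith (PySem.Chars.strip l.toList) ['+'] = true := by
          simpa [isOpen, Bool.and_eq_true] using h
        have hstep : stepA (false, ts, ns, [], c, tf) l =
            (true, ts, (if c ≠ [] then ns ++ [c] else ns), [l],
             (if c ≠ [] then ([] : List String) else c), (if tf = none then some false else tf)) := by
          simp [stepA, h1, h2]
        rw [hstep]
        have hcnt : (if c ≠ [] then ([] : List String) else c) = [] := by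
          by_cases hcn : c = [] <;> simp [hcn]
        cases tf with
        | none =>
          rw [hcnt, show (if (none : Option Bool) = none then some false else none) = some false from rfl,
            ih.2 _ _ [l] false (by simp)]
          rw [altGo_cons_open ls h]
          have hnt : ntb c (l :: ls) =
              (if c ≠ [] then [c] else []) ++ (altGo (ls.dropWhile isCont)).2 := by
            by_cases hcn : c = [] <;>
              simp [ntb, h, altGo_cons_open ls h, hcn]
          rw [hnt]
          have htfu : tfUpd none (l :: ls) = some false := by simp [tfUpd, h]
          rw [htfu]
          by_cases hcn : c = [] <;> simp [hcn]
        | some x =>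
          rw [hcnt, show (if (some x : Option Bool) = none then some false else some x) = some x from rfl,
            ih.2 _ _ [l] x (by simp)]
          rw [altGo_cons_open ls h]
          have hnt : ntb c (l :: ls) =
              (if c ≠ [] then [c] else []) ++ (altGo (ls.dropWhile isCont)).2 := by
            by_cases hcn : c = [] <;>
              simp [ntb, h, altGo_cons_open ls h, hcn]
          rw [hnt, show tfUpd (some x) (l :: ls) = some x from rfl]
          by_cases hcn : c = [] <;> simp [hcn]
      · simp only [Bool.not_eq_true] at h
        have h1 : (PySem.Chars.startswith l.toList ['+'] &&
            PySem.Chars.endswith (PySem.Chars.strip l.toList) ['+']) = false := by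
          simpa [isOpen] using h
        have hstep : stepA (false, ts, ns, [], c, tf) l =
            (false, ts, ns, [], c ++ [l], (if tf = none then some true else tf)) := by
          cases hA : PySem.Chars.startswith l.toList ['+'] with
          | false => simp [stepA, hA]
          | true =>
            have hB : PySem.Chars.endswith (PySem.Chars.strip l.toList) ['+'] = false := by
              rw [hA] at h1; simpa using h1
            simp [stepA, hA, hB]
        rw [hstep, (ih.1) ts ns (c ++ [l]) _]
        have hfst : (altGo (l :: ls)).1 = (altGo ls).1 := by
          rw [altGo_cons_not ls h, altGo_fst_dropWhile]
        have hnt : ntb c (l :: ls) = ntb (c ++ [l]) ls := by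
          simp [ntb, h]
        cases tf with
        | none =>
          rw [show (if (none : Option Bool) = none then some true else none) = some true from rfl,
            tfUpd_some, show tfUpd none (l :: ls) = some (!isOpen l) from rfl, h, hfst, hnt]
          simp
        | some x =>
          rw [show (if (some x : Option Bool) = none then some true else some x) = some x from rfl,
            tfUpd_some, show tfUpd (some x) (l :: ls) = some x from rfl, hfst, hnt]
    · intro ts ns ct b hct
      rw [List.foldl_cons]
      by_cases hc : isCont l = true
      · have hor : (PySem.Chars.startswith l.toList ['+'] ||
            PySem.Chars.startswith l.toList ['|']) = true := by
          simpa [isCont] using hc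
        have hstep : stepA (true, ts, ns, ct, [], some b) l =
            (true, ts, ns, ct ++ [l], [], some b) := by
          simp [stepA, hor]
        rw [hstep, ih.2 _ _ (ct ++ [l]) b (by simp)]
        simp [hc]
      · simp only [Bool.not_eq_true] at hc
        have hpr : PySem.Chars.startswith l.toList ['+'] = false ∧
            PySem.Chars.startswith l.toList ['|'] = false := by
          simpa [isCont, Bool.or_eq_false_iff] using hc
        have hopen : isOpen l = false := by simp [isOpen, hpr.1]
        have hstep : stepA (true, ts, ns, ct, [], some b) l =
            (false, ts ++ [ct], ns, [], [l], some b) := by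
          simp [stepA, hpr.1, hpr.2]
        rw [hstep, (ih.1) (ts ++ [ct]) ns [l] (some b)]
        have hnt : ntb [l] ls = (altGo (l :: ls)).2 := by
          simp [ntb, altGo_cons_not ls hopen]
        rw [hnt, tfUpd_some, altGo_cons_not ls hopen]
        simp [hc]
        exact ⟨by rw [altGo_cons_not ls hopen, altGo_fst_dropWhile],
               by rw [altGo_cons_not ls hopen]⟩

theorem ntb_nil_eq (lines : List String) : ntb [] lines = (altGo lines).2 := by
  cases lines with
  | nil => simp [ntb, altGo_nil]
  | cons l ls =>
    by_cases h : isOpen l = true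
    · simp [ntb, h, altGo_cons_open ls h]
    · simp only [Bool.not_eq_true] at h
      simp [ntb, h, altGo_cons_not ls h]

-- ===== VERDICT (by name: the statement is the Claim_ definition above) =====
theorem find_tables_spec : Claim_equal_find_tables := by
  intro lines _
  unfold Spec_find_tables find_tables find_tables_alt
  rw [(mainAux lines).1 [] [] [] none]
  simp only [List.nil_append, ntb_nil_eq]
  cases lines <;> simp [tfUpd]
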